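-- pv_equiv track=rewrite | github.com/tonilastre/advent-of-code | aoc-2023/days/04.py | get_wins_by_card
-- ===== SOURCE A (Python) =====
-- def get_wins_by_card(card):
--     winning_numbers, current_numbers = card
--     is_winning_used = [False] * len(winning_numbers)
--     for number in current_numbers:
--         for i, winning_number in enumerate(winning_numbers):
--             if number == winning_number and not is_winning_used[i]:
--                 is_winning_used[i] = True
--                 break
--     return sum(is_winning_used)
-- ===== SOURCE B (Python) =====
-- def get_wins_by_card(card):
--     winning_numbers, current_numbers = card
--     w = sorted(winning_numbers)
--     c = sorted(current_numbers)
--     i = j = matches = 0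
--     while i < len(w) and j < len(c):
--         if w[i] == c[j]:
--             matches += 1
--             i += 1
--             j += 1
--         elif w[i] < c[j]:
--             i += 1
--         else:
--             j += 1
--     return matches
-- ===== Notes on version B (the rewrite author's own statement) =====
-- stated objective: faster
-- what changed: Replaced the nested scan over winning numbers with a used-flags list by sorting both lists once and counting matches with a two-pointer merge (multiset-intersection size).
import Mathlib
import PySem

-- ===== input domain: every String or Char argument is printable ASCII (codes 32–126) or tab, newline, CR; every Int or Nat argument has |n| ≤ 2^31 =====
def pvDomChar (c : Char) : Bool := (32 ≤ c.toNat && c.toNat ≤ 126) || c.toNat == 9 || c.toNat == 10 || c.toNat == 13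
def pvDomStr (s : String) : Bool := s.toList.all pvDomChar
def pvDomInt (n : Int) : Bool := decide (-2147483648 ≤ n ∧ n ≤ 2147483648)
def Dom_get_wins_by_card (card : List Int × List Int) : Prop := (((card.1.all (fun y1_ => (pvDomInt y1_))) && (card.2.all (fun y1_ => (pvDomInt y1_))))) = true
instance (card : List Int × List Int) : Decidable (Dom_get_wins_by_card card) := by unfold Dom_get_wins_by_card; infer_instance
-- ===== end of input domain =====

-- B sorts both lists once and counts matches by a two-pointer merge instead of A's nested used-flags scan (faster: O(n log n + m log m) vs O(n·m)).

-- ===== PORT A =====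
-- inner 'for i, winning_number in enumerate(winning_numbers): if number == winning_number and not is_winning_used[i]: is_winning_used[i] = True; break'
-- ported as a simultaneous walk over the winning numbers and the flag list (the flag list always has length len(winning_numbers)).
def pvMark : List Int → List Bool → Int → List Bool
  | wn :: ws, u :: us, n =>
      if n == wn && !u then true :: us
      else u :: pvMark ws us n
  | _, us, _ => us

def get_wins_by_card (card : List Int × List Int) : Int :=
  let winning_numbers := card.1
  let current_numbers := card.2
  let is_winning_used : List Bool := List.replicate winning_numbers.length false
  let final := current_numbers.foldl (fun used n => pvMark winning_numbers used n) is_winning_used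
  final.foldl (fun s b => s + (if b then 1 else 0)) (0 : Int)   -- sum(is_winning_used)

-- ===== PORT B =====
-- two-pointer merge over the two sorted lists (indices become structural recursion)
def pvMerge : List Int → List Int → Int
  | x :: xs, y :: ys =>
      if x = y then 1 + pvMerge xs ys
      else if x < y then pvMerge xs (y :: ys)
      else pvMerge (x :: xs) ys
  | _, _ => 0
  termination_by xs ys => xs.length + ys.length
  decreasing_by all_goals (simp [List.length_cons]; try omega)

def get_wins_by_card_alt (card : List Int × List Int) : Int :=
  pvMerge (PySem.List.sorted card.1 (fun x => x)) (PySem.List.sorted card.2 (fun x => x))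

-- ===== PRECONDITION & SPEC =====
def Spec_get_wins_by_card (card : List Int × List Int) (out : Int) : Prop := out = get_wins_by_card_alt card
instance (card : List Int × List Int) (out : Int) : Decidable (Spec_get_wins_by_card card out) := by unfold Spec_get_wins_by_card; infer_instance

-- ===== CLAIM (what is proved, stated in full; the proofs are below) =====
def Claim_equal_get_wins_by_card : Prop := ∀ (card : List Int × List Int), Dom_get_wins_by_card card → Spec_get_wins_by_card card (get_wins_by_card card)

-- ===== LEMMAS AND PROOFS =====

-- multiset of winning numbers whose flag is still false
def unusedM : List Int → List Bool → Multiset Int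
  | wn :: ws, u :: us => if u then unusedM ws us else wn ::ₘ unusedM ws us
  | _, _ => 0

theorem pvMark_length (w : List Int) (us : List Bool) (n : Int) :
    (pvMark w us n).length = us.length := by
  induction w generalizing us with
  | nil => simp [pvMark]
  | cons wn ws ih =>
    cases us with
    | nil => simp [pvMark]
    | cons u tl =>
      by_cases h : (n == wn && !u) = true
      · simp [pvMark, h]
      · simp [pvMark, h, ih]

theorem pvMark_unused (w : List Int) (us : List Bool) (n : Int)
    (h : w.length = us.length) :
    unusedM w (pvMark w us n) = (unusedM w us).erase n := by
  induction w generalizing us with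
  | nil => cases us <;> simp [unusedM]
  | cons wn ws ih =>
    cases us with
    | nil => simp at h
    | cons u tl =>
      simp only [List.length_cons, Nat.add_right_cancel_iff] at h
      by_cases hu : u
      · subst hu
        have : (n == wn && !true) = false := by simp
        simp [pvMark, unusedM, ih tl h]
      · simp only [Bool.not_eq_true] at hu; subst hu
        by_cases he : n = wn
        · subst he
          simp [pvMark, unusedM, Multiset.erase_cons_head]
        · have hb : (n == wn && !false) = false := by simp [he]
          rw [show pvMark (wn :: ws) (false :: tl) n = false :: pvMark ws tl n from by
            simp [pvMark, he]]
          simp only [unusedM, Bool.false_eq_true, if_false]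
          rw [ih tl h, Multiset.erase_cons_tail _ (Ne.symm he)]

theorem pvMark_count (w : List Int) (us : List Bool) (n : Int)
    (h : w.length = us.length) :
    (pvMark w us n).countP (fun b => b)
      = us.countP (fun b => b) + (if n ∈ unusedM w us then 1 else 0) := by
  induction w generalizing us with
  | nil => cases us <;> simp [pvMark, unusedM]
  | cons wn ws ih =>
    cases us with
    | nil => simp at h
    | cons u tl =>
      simp only [List.length_cons, Nat.add_right_cancel_iff] at h
      by_cases hu : u
      · subst hu
        have : (n == wn && !true) = false := by simp
        simp only [pvMark, this, Bool.false_eq_true, if_false, unusedM, if_true,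
          List.countP_cons]
        have := ih tl h
        
        omega
      · simp only [Bool.not_eq_true] at hu; subst hu
        by_cases he : n = wn
        · subst he
          simp [pvMark, unusedM]
        · have hb : (n == wn && !false) = false := by simp [he]
          have hm : n ∈ unusedM (wn :: ws) (false :: tl) ↔ n ∈ unusedM ws tl := by
            simp [unusedM, he]
          simp only [pvMark, hb, Bool.false_eq_true, if_false, List.countP_cons, ih tl h, hm]
          omega

theorem fold_mark (w : List Int) (c : List Int) :
    ∀ us : List Bool, w.length = us.length →
    (c.foldl (fun u n => pvMark w u n) us).countP (fun b => b)
        + Multiset.card (unusedM w us - (c : Multiset Int))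
      = us.countP (fun b => b) + Multiset.card (unusedM w us) := by
  induction c with
  | nil => intro us _; simp
  | cons n c' ih =>
    intro us h
    have h1 : w.length = (pvMark w us n).length := by rw [pvMark_length]; exact h
    have key := ih (pvMark w us n) h1
    have hsub : unusedM w us - ((n :: c' : List Int) : Multiset Int)
        = unusedM w (pvMark w us n) - (c' : Multiset Int) := by
      have : ((n :: c' : List Int) : Multiset Int) = n ::ₘ (c' : Multiset Int) := rfl
      rw [this, Multiset.sub_cons, pvMark_unused w us n h]
    simp only [List.foldl_cons, hsub]
    rw [pvMark_count w us n h] at key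
    by_cases hm : n ∈ unusedM w us
    · have hcard : Multiset.card (unusedM w (pvMark w us n))
          = Multiset.card (unusedM w us) - 1 := by
        rw [pvMark_unused w us n h, Multiset.card_erase_of_mem hm, Nat.pred_eq_sub_one]
      have hpos : 1 ≤ Multiset.card (unusedM w us) :=
        Multiset.card_pos.mpr (fun h0 => by simp [h0] at hm)
      simp only [hm, if_true] at key
      omega
    · have hsame : unusedM w (pvMark w us n) = unusedM w us := by
        rw [pvMark_unused w us n h, Multiset.erase_of_notMem hm]
      simp only [hm, if_false] at key
      rw [hsame]
      rw [hsame] at key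
      omega

theorem unusedM_replicate (w : List Int) :
    unusedM w (List.replicate w.length false) = (w : Multiset Int) := by
  induction w with
  | nil => simp [unusedM]
  | cons x xs ih => simp [List.replicate, unusedM, ih]

theorem countP_replicate_false (n : Nat) :
    (List.replicate n false).countP (fun b => b) = 0 := by
  induction n with
  | zero => simp
  | succ k ih => simp [List.replicate, ih]

theorem foldl_sum_bool (us : List Bool) (s : Int) :
    us.foldl (fun s b => s + (if b then 1 else 0)) s
      = s + (us.countP (fun b => b) : Int) := by
  induction us generalizing s with
  | nil => simp
  | cons b tl ih =>
    cases b <;> (simp [ih]; try ring)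

-- A's result: count of matched flags
theorem get_wins_by_card_eq (w c : List Int) :
    get_wins_by_card (w, c)
      = ((Multiset.card ((w : Multiset Int))
          - Multiset.card ((w : Multiset Int) - (c : Multiset Int)) : Nat) : Int) := by
  have h0 : w.length = (List.replicate w.length false).length := by simp
  have key := fold_mark w c (List.replicate w.length false) h0
  rw [unusedM_replicate, countP_replicate_false] at key
  have hle : Multiset.card ((w : Multiset Int) - (c : Multiset Int))
      ≤ Multiset.card ((w : Multiset Int)) :=
    Multiset.card_le_card (Multiset.sub_le_self _ _)
  simp only [get_wins_by_card, foldl_sum_bool]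
  have : (c.foldl (fun u n => pvMark w u n) (List.replicate w.length false)).countP
      (fun b => b)
      = Multiset.card ((w : Multiset Int))
        - Multiset.card ((w : Multiset Int) - (c : Multiset Int)) := by omega
  rw [this]
  push_cast [Nat.cast_sub hle]
  ring

-- B's merge on sorted lists computes the multiset-intersection size
theorem pvMerge_card (xs ys : List Int)
    (hx : xs.Pairwise (· ≤ ·)) (hy : ys.Pairwise (· ≤ ·)) :
    pvMerge xs ys
      = (Multiset.card ((xs : Multiset Int) ∩ (ys : Multiset Int)) : Int) := by
  induction xs, ys using pvMerge.induct with
  | case1 xs y ys ih =>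
    have hx' := (List.pairwise_cons.mp hx).2
    have hy' := (List.pairwise_cons.mp hy).2
    rw [pvMerge, if_pos rfl, ih hx' hy']
    have hco : ((y :: xs : List Int) : Multiset Int) ∩ ((y :: ys : List Int) : Multiset Int)
        = y ::ₘ ((xs : Multiset Int) ∩ (ys : Multiset Int)) := by
      rw [← Multiset.cons_coe, ← Multiset.cons_coe,
        Multiset.cons_inter_of_pos _ (by simp : y ∈ (y ::ₘ (ys : Multiset Int))),
        Multiset.erase_cons_head]
    rw [hco, Multiset.card_cons]
    push_cast
    ring
  | case2 x xs y ys hne hlt ih =>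
    have hx' := (List.pairwise_cons.mp hx).2
    have hnot : x ∉ (y ::ₘ (ys : Multiset Int)) := by
      intro hmem
      rcases (by simpa using hmem : x = y ∨ x ∈ ys) with h | h
      · exact hne h
      · exact absurd ((List.pairwise_cons.mp hy).1 x h) (by omega)
    rw [pvMerge, if_neg hne, if_pos hlt, ih hx' hy,
      ← Multiset.cons_coe x, ← Multiset.cons_coe y,
      Multiset.cons_inter_of_neg _ hnot, Multiset.cons_coe]
  | case3 x xs y ys hne hnlt ih =>
    have hy' := (List.pairwise_cons.mp hy).2
    have hnot : y ∉ (x ::ₘ (xs : Multiset Int)) := by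
      intro hmem
      rcases (by simpa using hmem : y = x ∨ y ∈ xs) with h | h
      · exact hne h.symm
      · exact absurd ((List.pairwise_cons.mp hx).1 y h) (by omega)
    rw [pvMerge, if_neg hne, if_neg hnlt, ih hx hy',
      ← Multiset.cons_coe x, ← Multiset.cons_coe y,
      Multiset.inter_comm (x ::ₘ (xs : Multiset Int)) (y ::ₘ (ys : Multiset Int)),
      Multiset.cons_inter_of_neg _ hnot,
      Multiset.inter_comm (x ::ₘ (xs : Multiset Int)) (ys : Multiset Int)]
  | case4 xs ys hboth =>
    rcases xs with _ | ⟨x, xs⟩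
    · simp [pvMerge]
    · rcases ys with _ | ⟨y, ys⟩
      · simp [pvMerge]
      · exact (hboth x xs y ys rfl rfl).elim

theorem coe_sorted (xs : List Int) :
    ((PySem.List.sorted xs (fun x => x) : List Int) : Multiset Int) = (xs : Multiset Int) :=
  Quot.sound (PySem.List.sorted_perm xs (fun x => x) false)

-- ===== VERDICT (by name: the statement is the Claim_ definition above) =====
theorem get_wins_by_card_spec : Claim_equal_get_wins_by_card := by
  intro card _
  obtain ⟨w, c⟩ := card
  show get_wins_by_card (w, c) = get_wins_by_card_alt (w, c)
  rw [get_wins_by_card_eq]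
  unfold get_wins_by_card_alt
  rw [pvMerge_card _ _ (PySem.List.sorted_pairwise w (fun x => x))
      (PySem.List.sorted_pairwise c (fun x => x)),
    coe_sorted, coe_sorted]
  have hle : Multiset.card ((w : Multiset Int) - (c : Multiset Int))
      ≤ Multiset.card ((w : Multiset Int)) :=
    Multiset.card_le_card (Multiset.sub_le_self _ _)
  have hsum := congrArg Multiset.card (Multiset.sub_add_inter (w : Multiset Int) (c : Multiset Int))
  rw [Multiset.card_add] at hsum
  have : Multiset.card ((w : Multiset Int))
      - Multiset.card ((w : Multiset Int) - (c : Multiset Int))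
      = Multiset.card ((w : Multiset Int) ∩ (c : Multiset Int)) := by omega
  rw [this]
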